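-- pv_equiv track=rewrite | github.com/chrisjihee/GNER | generate.py | find_increasing_indices
-- ===== SOURCE A (Python) =====
-- def find_increasing_indices(lst):
--     if not lst:
--         return []
--
--     indices = []
--     prev_value = lst[0]
--
--     for i in range(1, len(lst)):
--         if lst[i] > prev_value:
--             indices.append(i)
--             prev_value = lst[i]  # Update previous value to the new threshold
--
--     return indices
-- ===== SOURCE B (Python) =====
-- def find_increasing_indices(lst):
--     # Build an explicit prefix-maximum table in one pass, then select
--     # indices whose value strictly exceeds the prefix max before them.
--     prefix = []
--     m = None
--     for v in lst:
--         if m is None or v > m: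
--             m = v
--         prefix.append(m)
--     return [i for i in range(1, len(lst)) if lst[i] > prefix[i - 1]]
-- ===== Notes on version B (the rewrite author's own statement) =====
-- stated objective: alternative
-- what changed: Replaces the single loop threading a mutable prev_value with a two-pass scheme: first build an explicit prefix-maximum table, then select indices by comparing each element against the table entry before it.
import Mathlib
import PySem

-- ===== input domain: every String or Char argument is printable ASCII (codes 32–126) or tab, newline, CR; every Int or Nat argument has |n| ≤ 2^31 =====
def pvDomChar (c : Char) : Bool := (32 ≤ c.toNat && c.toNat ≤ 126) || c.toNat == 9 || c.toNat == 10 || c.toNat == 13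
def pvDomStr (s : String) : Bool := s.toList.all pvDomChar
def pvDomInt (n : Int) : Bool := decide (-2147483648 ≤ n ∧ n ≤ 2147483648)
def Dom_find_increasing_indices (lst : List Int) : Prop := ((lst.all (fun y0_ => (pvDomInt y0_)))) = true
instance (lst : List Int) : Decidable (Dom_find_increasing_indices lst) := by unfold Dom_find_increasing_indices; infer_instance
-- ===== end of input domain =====

-- B rebuilds the result from an explicit prefix-maximum table (two passes) instead of A's single loop with a mutable threshold; same cost, different decomposition.

-- ===== PORT A =====
def find_increasing_indices (lst : List Int) : List Int :=
  match lst with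
  | [] => []
  | x :: _ =>
    ((PySem.List.pyRange 1 (lst.length : Int) 1).foldl
      (fun (s : List Int × Int) i =>
        if PySem.List.pyGetD lst i 0 > s.2 then (s.1 ++ [i], PySem.List.pyGetD lst i 0) else s)
      ([], x)).1

-- ===== PORT B =====
def find_increasing_indices_alt (lst : List Int) : List Int :=
  let st := lst.foldl
    (fun (s : List Int × Option Int) v =>
      let m : Int := match s.2 with
        | none => v
        | some m0 => if v > m0 then v else m0
      (s.1 ++ [m], some m)) ([], none)
  let pfx := st.1
  (PySem.List.pyRange 1 (lst.length : Int) 1).filter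
    (fun i => decide (PySem.List.pyGetD lst i 0 > PySem.List.pyGetD pfx (i - 1) 0))

-- ===== PRECONDITION & SPEC =====
def Spec_find_increasing_indices (lst : List Int) (out : List Int) : Prop := out = find_increasing_indices_alt lst
instance (lst : List Int) (out : List Int) : Decidable (Spec_find_increasing_indices lst out) := by unfold Spec_find_increasing_indices; infer_instance

-- ===== CLAIM (what is proved, stated in full; the proofs are below) =====
def Claim_equal_find_increasing_indices : Prop := ∀ (lst : List Int), Dom_find_increasing_indices lst → Spec_find_increasing_indices lst (find_increasing_indices lst)

-- ===== LEMMAS AND PROOFS =====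

-- Proof-only helper: the prefix-maximum table of l starting from running max m,
-- together with the final running max.
def pmAux (m : Int) : List Int → List Int × Int
  | [] => ([], m)
  | v :: t =>
    let m' := if v > m then v else m
    ((pmAux m' t).1.cons m', (pmAux m' t).2)

-- B's fold computes pmAux.
theorem foldB (l : List Int) (acc : List Int) (m : Int) :
    l.foldl
      (fun (s : List Int × Option Int) v =>
        let m : Int := match s.2 with
          | none => v
          | some m0 => if v > m0 then v else m0
        (s.1 ++ [m], some m)) (acc, some m)
      = (acc ++ (pmAux m l).1, some (pmAux m l).2) := by
  induction l generalizing acc m with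
  | nil => simp [pmAux]
  | cons v t ih => simp [pmAux, ih]

theorem pm_get_zero (m v : Int) (t : List Int) :
    (pmAux m (v :: t)).1[0]?.getD 0 = if m < v then v else m := by
  simp [pmAux]

theorem pm_get_succ (k : Nat) (m : Int) (l : List Int) (h : k + 1 < l.length) :
    (pmAux m l).1[k + 1]?.getD 0 =
      if (pmAux m l).1[k]?.getD 0 < l[k + 1]?.getD 0 then l[k + 1]?.getD 0
      else (pmAux m l).1[k]?.getD 0 := by
  induction k generalizing m l with
  | zero =>
    cases l with
    | nil => simp at h
    | cons v t =>
      cases t with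
      | nil => simp at h
      | cons w t' => simp [pmAux]
  | succ k ih =>
    cases l with
    | nil => simp at h
    | cons v t =>
      simp only [List.length_cons] at h
      simp only [pmAux, List.getElem?_cons_succ]
      exact ih _ t (by omega)

-- The table x :: (pmAux x t).1 satisfies the prefix-max recurrence.
theorem table_rec (x : Int) (t : List Int) (j : Nat) (h1 : 1 ≤ j) (hj : j < (x :: t).length) :
    (x :: (pmAux x t).1)[j]?.getD 0 =
      if (x :: (pmAux x t).1)[j - 1]?.getD 0 < (x :: t)[j]?.getD 0
      then (x :: t)[j]?.getD 0 else (x :: (pmAux x t).1)[j - 1]?.getD 0 := by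
  simp only [List.length_cons] at hj
  cases j with
  | zero => omega
  | succ k =>
    cases k with
    | zero =>
      cases t with
      | nil => simp at hj
      | cons w t' => simp [pm_get_zero]
    | succ k' =>
      have hk := pm_get_succ k' x t (by omega)
      simpa using hk

-- Main loop correspondence: A's fold over the index range, started with
-- prev = P[j-1] for a table P satisfying the prefix-max recurrence,
-- produces exactly B's filtered index list.
theorem mainLoop (lst P : List Int)
    (hrec : ∀ j : Nat, 1 ≤ j → j < lst.length →
      P[j]?.getD 0 = if P[j - 1]?.getD 0 < lst[j]?.getD 0 then lst[j]?.getD 0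
                     else P[j - 1]?.getD 0) :
    ∀ (d j : Nat) (acc : List Int), 1 ≤ j → j + d = lst.length →
    ((PySem.List.pyRange (j : Int) (lst.length : Int) 1).foldl
      (fun (s : List Int × Int) i =>
        if PySem.List.pyGetD lst i 0 > s.2 then (s.1 ++ [i], PySem.List.pyGetD lst i 0) else s)
      (acc, P[j - 1]?.getD 0)).1
    = acc ++ (PySem.List.pyRange (j : Int) (lst.length : Int) 1).filter
        (fun i => decide (PySem.List.pyGetD lst i 0 > PySem.List.pyGetD P (i - 1) 0)) := by
  intro d
  induction d with
  | zero =>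
    intro j acc h1 h2
    rw [PySem.List.pyRange_one_eq_nil (by omega)]
    simp
  | succ d ih =>
    intro j acc h1 h2
    have hjlt : (j : Int) < (lst.length : Int) := by omega
    rw [PySem.List.pyRange_one_cons hjlt]
    have hc1 : ((j : Int) - 1) = ((j - 1 : Nat) : Int) := by omega
    simp only [List.foldl_cons, List.filter_cons, hc1, PySem.List.pyGetD_natCast,
      List.getD_eq_getElem?_getD, gt_iff_lt]
    have hstep := hrec j h1 (by omega)
    have hcast : ((j : Int) + 1) = ((j + 1 : Nat) : Int) := by omega
    by_cases hgt : P[j - 1]?.getD 0 < lst[j]?.getD 0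
    · have hP : lst[j]?.getD 0 = P[(j + 1) - 1]?.getD 0 := by
        simp only [Nat.add_sub_cancel, hstep, if_pos hgt]
      have hrest := ih (j + 1) (acc ++ [(j : Int)]) (by omega) (by omega)
      rw [← hP] at hrest
      rw [if_pos hgt, hcast, hrest]
      simp [hgt]
    · have hP : P[j - 1]?.getD 0 = P[(j + 1) - 1]?.getD 0 := by
        simp only [Nat.add_sub_cancel, hstep, if_neg hgt]
      have hrest := ih (j + 1) acc (by omega) (by omega)
      rw [← hP] at hrest
      rw [if_neg hgt, hcast, hrest]
      simp [hgt]

-- ===== VERDICT (by name: the statement is the Claim_ definition above) =====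
theorem find_increasing_indices_spec : Claim_equal_find_increasing_indices := by
  intro lst _
  unfold Spec_find_increasing_indices find_increasing_indices find_increasing_indices_alt
  cases lst with
  | nil => simp [PySem.List.pyRange_one_eq_nil]
  | cons x t =>
    simp only [List.foldl_cons, foldB]
    have hM := mainLoop (x :: t) (x :: (pmAux x t).1) (table_rec x t) t.length 1 [] (by omega) (by simp [Nat.add_comm])
    simpa using hM
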